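-- pv_equiv track=rewrite | github.com/ikramaliokz/product-listing | pipeline.py | get_pid_to_int_id
-- ===== SOURCE A (Python) =====
-- def get_pid_to_int_id(ids,intId_image_dict):
--     pid_to_int_ID={}
--
--     for id in ids:
--         pid=str(intId_image_dict[id]['p_id'])
--         if pid not in pid_to_int_ID:
--             pid_to_int_ID[pid]=[id]
--         else:
--             pid_to_int_ID[pid].append(id)
--     return pid_to_int_ID
-- ===== SOURCE B (Python) =====
-- def get_pid_to_int_id(ids, intId_image_dict):
--     keyed = [(str(intId_image_dict[i]['p_id']), i) for i in ids]
--     order = list(dict.fromkeys(k for k, _ in keyed))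
--     return {k: [i for q, i in keyed if q == k] for k in order}
-- ===== Notes on version B (the rewrite author's own statement) =====
-- stated objective: alternative
-- what changed: Replaces the single-pass dict-accumulation with a key-materialisation pass: build (key, id) pairs once, dedup the keys in first-occurrence order, then build each group by a per-key filter over the pairs (dict comprehension).
import Mathlib
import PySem

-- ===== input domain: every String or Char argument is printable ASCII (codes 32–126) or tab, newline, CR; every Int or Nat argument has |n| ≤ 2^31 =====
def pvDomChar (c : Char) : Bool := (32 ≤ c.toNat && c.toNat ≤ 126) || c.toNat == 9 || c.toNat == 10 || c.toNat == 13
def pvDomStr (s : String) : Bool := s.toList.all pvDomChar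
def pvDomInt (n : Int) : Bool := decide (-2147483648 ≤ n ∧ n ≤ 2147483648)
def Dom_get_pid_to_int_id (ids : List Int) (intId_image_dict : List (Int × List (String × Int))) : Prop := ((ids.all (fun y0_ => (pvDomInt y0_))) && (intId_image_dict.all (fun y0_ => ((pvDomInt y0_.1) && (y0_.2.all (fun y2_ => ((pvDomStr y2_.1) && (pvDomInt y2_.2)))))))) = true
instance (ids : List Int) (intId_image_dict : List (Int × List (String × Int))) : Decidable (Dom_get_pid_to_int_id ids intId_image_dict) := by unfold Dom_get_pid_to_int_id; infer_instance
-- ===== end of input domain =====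

-- ===== PORT A =====
-- B changes structure only: (key,id) pairs materialised once, keys deduped, groups built by per-key filter (no speed claim).
-- A: single pass over ids, accumulating groups in an insertion-ordered dict (returned as its items list).
def get_pid_to_int_id (ids : List Int) (intId_image_dict : List (Int × List (String × Int))) : List (String × List Int) :=
  (ids.foldl (fun acc id =>
      let pid := PySem.Int.toStr ((PySem.Dict.mk ((PySem.Dict.mk intId_image_dict).getD id [])).getD "p_id" 0)
      if acc.contains pid then acc.modify pid [] (fun l => l ++ [id])
      else acc.insert pid [id])
    (PySem.Dict.empty : PySem.Dict String (List Int))).items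

-- ===== PORT B =====
-- str(intId_image_dict[i]['p_id'])  (the KeyError cases are excluded by Pre_; the defaults are never reached there)
def pvKey (intId_image_dict : List (Int × List (String × Int))) (i : Int) : String :=
  PySem.Int.toStr ((PySem.Dict.mk ((PySem.Dict.mk intId_image_dict).getD i [])).getD "p_id" 0)

def get_pid_to_int_id_alt (ids : List Int) (intId_image_dict : List (Int × List (String × Int))) : List (String × List Int) :=
  let keyed := ids.map (fun i => (pvKey intId_image_dict i, i))
  let order := PySem.List.dedup (keyed.map (fun p => p.1))
  order.map (fun k => (k, (keyed.filter (fun q => q.1 == k)).map (fun q => q.2)))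

-- ===== PRECONDITION & SPEC =====
-- Pre_ excludes exactly the KeyError inputs: an id missing from intId_image_dict, or an entry without a 'p_id' key.
def Pre_get_pid_to_int_id (ids : List Int) (intId_image_dict : List (Int × List (String × Int))) : Prop :=
  ∀ i ∈ ids, (PySem.Dict.mk intId_image_dict).contains i = true ∧
    (PySem.Dict.mk ((PySem.Dict.mk intId_image_dict).getD i [])).contains "p_id" = true
instance (ids : List Int) (intId_image_dict : List (Int × List (String × Int))) : Decidable (Pre_get_pid_to_int_id ids intId_image_dict) := by unfold Pre_get_pid_to_int_id; infer_instance

def pvWitness_get_pid_to_int_id : List Int × (List (Int × List (String × Int))) :=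
  ([1, 2, 1, 3], [(1, [("p_id", 5)]), (2, [("p_id", 6)]), (3, [("p_id", 5)])])

def Spec_get_pid_to_int_id (ids : List Int) (intId_image_dict : List (Int × List (String × Int))) (out : List (String × List Int)) : Prop := out = get_pid_to_int_id_alt ids intId_image_dict
instance (ids : List Int) (intId_image_dict : List (Int × List (String × Int))) (out : List (String × List Int)) : Decidable (Spec_get_pid_to_int_id ids intId_image_dict out) := by unfold Spec_get_pid_to_int_id; infer_instance

-- ===== CLAIM (what is proved, stated in full; the proofs are below) =====
def Claim_equal_get_pid_to_int_id : Prop := ∀ (ids : List Int) (intId_image_dict : List (Int × List (String × Int))), Dom_get_pid_to_int_id ids intId_image_dict → Pre_get_pid_to_int_id ids intId_image_dict → Spec_get_pid_to_int_id ids intId_image_dict (get_pid_to_int_id ids intId_image_dict)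

-- ===== LEMMAS AND PROOFS =====

-- A's branch is exactly Dict.modify (append to the existing group, or start a fresh one).
theorem pv_step_eq_modify (acc : PySem.Dict String (List Int)) (k : String) (i : Int) :
    (if acc.contains k then acc.modify k [] (fun l => l ++ [i]) else acc.insert k [i])
      = acc.modify k [] (fun l => l ++ [i]) := by
  by_cases h : acc.contains k = true
  · simp [h]
  · simp only [Bool.not_eq_true] at h
    simp [h, PySem.Dict.modify, PySem.Dict.getD_of_not_contains _ _ h]

theorem get_pid_to_int_id_eq (ids : List Int) (imd : List (Int × List (String × Int))) :
    get_pid_to_int_id ids imd = get_pid_to_int_id_alt ids imd := by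
  unfold get_pid_to_int_id get_pid_to_int_id_alt
  have hstep : (ids.foldl (fun acc id =>
      let pid := PySem.Int.toStr ((PySem.Dict.mk ((PySem.Dict.mk imd).getD id [])).getD "p_id" 0)
      if acc.contains pid then acc.modify pid [] (fun l => l ++ [id])
      else acc.insert pid [id]) (PySem.Dict.empty : PySem.Dict String (List Int)))
      = (ids.map (fun i => (pvKey imd i, i))).foldl
          (fun d p => d.modify p.1 [] (fun l => l ++ [p.2])) PySem.Dict.empty := by
    rw [List.foldl_map]
    apply PySem.List.foldl_congr_mem
    intro acc i _
    simpa [pvKey] using pv_step_eq_modify acc (pvKey imd i) i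
  rw [hstep]
  set keyed := ids.map (fun i => (pvKey imd i, i)) with hk
  set D := keyed.foldl (fun d p => d.modify p.1 [] (fun l => l ++ [p.2]))
             (PySem.Dict.empty : PySem.Dict String (List Int)) with hD
  have hkeys : D.keys = PySem.List.dedup (keyed.map (fun p => p.1)) := by
    rw [hD, PySem.Dict.keys_foldl_modify_key keyed (fun p => p.1) [] (fun _ p l => l ++ [p.2])]
    rw [PySem.List.dedup_eq_ofList]
    rfl
  have hnd : D.keys.Nodup := by
    rw [hD]
    exact PySem.Dict.nodup_keys_foldl_modify_key keyed (fun p => p.1) [] (fun _ p l => l ++ [p.2]) _ (by simp [PySem.Dict.keys_empty])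
  rw [PySem.Dict.items_eq_map_keys D hnd [], hkeys]
  apply List.map_congr_left
  intro k _
  have := PySem.Dict.getD_foldl_modify_append keyed (PySem.Dict.empty : PySem.Dict String (List Int)) k
  rw [hD]
  simp only [this, PySem.Dict.getD_empty, List.nil_append]

-- ===== VERDICT (by name: the statement is the Claim_ definition above) =====
theorem get_pid_to_int_id_spec : Claim_equal_get_pid_to_int_id := by
  intro ids imd _ _
  unfold Spec_get_pid_to_int_id
  exact get_pid_to_int_id_eq ids imd
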